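-- pv_equiv track=rewrite | github.com/LucasPagano/dl2 | utils.py | get_latent_steps
-- ===== SOURCE A (Python) =====
-- def get_latent_steps(nb_epochs, latent_size, nb_cuts_latent):
--     """Return a dictionary matching the epoch to the latent size to be trained"""
--     assert nb_cuts_latent <= latent_size
--
--     step_latent = latent_size // nb_cuts_latent
--     first_latent = step_latent + latent_size % nb_cuts_latent
--
--     step_epoch = nb_epochs // nb_cuts_latent
--     first_epoch = step_epoch + nb_epochs % nb_cuts_latent
--
--     size_latent = first_latent
--     epoch_stop = first_epoch
--     epoch_dict = {}
--     for e in range(nb_epochs):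
--         if e < epoch_stop:
--             epoch_dict[e] = size_latent
--         else:
--             size_latent += step_latent
--             epoch_stop += step_epoch
--             epoch_dict[e] = size_latent
--
--     return epoch_dict
-- ===== SOURCE B (Python) =====
-- def get_latent_steps(nb_epochs, latent_size, nb_cuts_latent):
--     """Return a dictionary matching the epoch to the latent size to be trained"""
--     assert nb_cuts_latent <= latent_size
--
--     step_latent = latent_size // nb_cuts_latent
--     first_latent = step_latent + latent_size % nb_cuts_latent
--
--     step_epoch = nb_epochs // nb_cuts_latent
--     first_epoch = step_epoch + nb_epochs % nb_cuts_latent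
--
--     if step_epoch == 0:
--         # fewer epochs than cuts: only the first cut's latent size is ever trained
--         epoch_dict = {}
--         for e in range(first_epoch):
--             epoch_dict[e] = first_latent
--         return epoch_dict
--
--     epoch_dict = {}
--     for c in range(nb_cuts_latent):
--         if c == 0:
--             lo, hi = 0, first_epoch
--         else:
--             lo = first_epoch + (c - 1) * step_epoch
--             hi = first_epoch + c * step_epoch
--         size = first_latent + c * step_latent
--         for e in range(lo, hi):
--             epoch_dict[e] = size
--     return epoch_dict
-- ===== Notes on version B (the rewrite author's own statement) =====
-- stated objective: alternative
-- what changed: B fills the dict segment-by-segment: an outer loop over the cuts computes each cut's constant latent size and its epoch range and assigns that size to every epoch of the range, replacing A's single epoch loop with the running size/threshold accumulator pair.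
-- outside the precondition, e.g. on get_latent_steps(-1, 3, 3): A returns {}, B returns {0: 1}; on get_latent_steps(3, 3, -3): A returns {0: -2, 1: -3, 2: -4}, B returns {}
import Mathlib
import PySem

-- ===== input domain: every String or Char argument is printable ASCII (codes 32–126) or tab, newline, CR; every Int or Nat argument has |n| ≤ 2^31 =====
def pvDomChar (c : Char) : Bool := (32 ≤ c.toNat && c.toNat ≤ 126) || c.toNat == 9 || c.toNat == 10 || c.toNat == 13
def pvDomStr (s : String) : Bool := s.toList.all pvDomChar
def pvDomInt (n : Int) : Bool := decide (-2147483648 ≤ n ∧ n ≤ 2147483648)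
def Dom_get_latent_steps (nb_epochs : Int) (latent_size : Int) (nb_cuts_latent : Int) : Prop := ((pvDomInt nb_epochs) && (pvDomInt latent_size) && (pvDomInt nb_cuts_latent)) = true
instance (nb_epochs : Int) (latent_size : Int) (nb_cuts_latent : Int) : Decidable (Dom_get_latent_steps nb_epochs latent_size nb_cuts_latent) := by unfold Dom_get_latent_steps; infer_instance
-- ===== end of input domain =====

-- B fills the dict segment-by-segment (outer loop over cuts, inner loop over that cut's
-- epoch range) instead of A's epoch loop with a running size/threshold accumulator;
-- alternative decomposition, same cost.

-- ===== PORT A =====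
def get_latent_steps (nb_epochs : Int) (latent_size : Int) (nb_cuts_latent : Int) : List (Int × Int) :=
  -- assert nb_cuts_latent <= latent_size  (and nb_cuts_latent ≠ 0 for '//'): excluded by Pre_
  let step_latent := PySem.Int.floordiv latent_size nb_cuts_latent
  let first_latent := step_latent + PySem.Int.mod latent_size nb_cuts_latent
  let step_epoch := PySem.Int.floordiv nb_epochs nb_cuts_latent
  let first_epoch := step_epoch + PySem.Int.mod nb_epochs nb_cuts_latent
  let st := (PySem.List.pyRange 0 nb_epochs 1).foldl
    (fun (s : Int × Int × PySem.Dict Int Int) e =>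
      if e < s.2.1 then (s.1, s.2.1, s.2.2.insert e s.1)
      else (s.1 + step_latent, s.2.1 + step_epoch, s.2.2.insert e (s.1 + step_latent)))
    (first_latent, first_epoch, PySem.Dict.empty)
  st.2.2.items

-- ===== PORT B =====
def get_latent_steps_alt (nb_epochs : Int) (latent_size : Int) (nb_cuts_latent : Int) : List (Int × Int) :=
  let step_latent := PySem.Int.floordiv latent_size nb_cuts_latent
  let first_latent := step_latent + PySem.Int.mod latent_size nb_cuts_latent
  let step_epoch := PySem.Int.floordiv nb_epochs nb_cuts_latent
  let first_epoch := step_epoch + PySem.Int.mod nb_epochs nb_cuts_latent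
  if step_epoch = 0 then
    -- fewer epochs than cuts: only the first cut's latent size is ever trained
    ((PySem.List.pyRange 0 first_epoch 1).foldl
      (fun (d : PySem.Dict Int Int) e => d.insert e first_latent) PySem.Dict.empty).items
  else
    ((PySem.List.pyRange 0 nb_cuts_latent 1).foldl
      (fun (d : PySem.Dict Int Int) c =>
        let lo := if c = 0 then 0 else first_epoch + (c - 1) * step_epoch
        let hi := if c = 0 then first_epoch else first_epoch + c * step_epoch
        let size := first_latent + c * step_latent
        (PySem.List.pyRange lo hi 1).foldl (fun d e => d.insert e size) d)
      PySem.Dict.empty).items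

-- ===== PRECONDITION & SPEC =====
-- Pre_ excludes nb_cuts_latent = 0 (A raises ZeroDivisionError), nb_cuts_latent > latent_size
-- (A raises AssertionError), and sign-mismatched inputs outside the natural domain of
-- epoch/cut counts (a negative epoch count with a positive cut count, or a negative cut
-- count with a positive epoch count), where A's returned dict is an accident of its
-- leftover threshold stepping.
def Pre_get_latent_steps (nb_epochs : Int) (latent_size : Int) (nb_cuts_latent : Int) : Prop :=
  nb_cuts_latent ≤ latent_size ∧
    ((1 ≤ nb_cuts_latent ∧ 0 ≤ nb_epochs) ∨ (nb_cuts_latent ≤ -1 ∧ nb_epochs ≤ 0))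
instance (nb_epochs : Int) (latent_size : Int) (nb_cuts_latent : Int) : Decidable (Pre_get_latent_steps nb_epochs latent_size nb_cuts_latent) := by unfold Pre_get_latent_steps; infer_instance
def pvWitness_get_latent_steps : Int × Int × Int := (10, 7, 3)

def Spec_get_latent_steps (nb_epochs : Int) (latent_size : Int) (nb_cuts_latent : Int) (out : List (Int × Int)) : Prop := out = get_latent_steps_alt nb_epochs latent_size nb_cuts_latent
instance (nb_epochs : Int) (latent_size : Int) (nb_cuts_latent : Int) (out : List (Int × Int)) : Decidable (Spec_get_latent_steps nb_epochs latent_size nb_cuts_latent out) := by unfold Spec_get_latent_steps; infer_instance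

-- ===== CLAIM (what is proved, stated in full; the proofs are below) =====
def Claim_equal_get_latent_steps : Prop := ∀ (nb_epochs : Int) (latent_size : Int) (nb_cuts_latent : Int), Dom_get_latent_steps nb_epochs latent_size nb_cuts_latent → Pre_get_latent_steps nb_epochs latent_size nb_cuts_latent → Spec_get_latent_steps nb_epochs latent_size nb_cuts_latent (get_latent_steps nb_epochs latent_size nb_cuts_latent)

-- ===== LEMMAS AND PROOFS =====

-- A's loop body (proof-only name; definitionally the lambda inside get_latent_steps)
def aStep (Δs Δq : Int) : (Int × Int × PySem.Dict Int Int) → Int → (Int × Int × PySem.Dict Int Int) :=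
  fun s e =>
    if e < s.2.1 then (s.1, s.2.1, s.2.2.insert e s.1)
    else (s.1 + Δs, s.2.1 + Δq, s.2.2.insert e (s.1 + Δs))

-- B's outer-loop body (proof-only name; definitionally the lambda inside get_latent_steps_alt)
def bSeg (Δs q fl fe : Int) : PySem.Dict Int Int → Int → PySem.Dict Int Int :=
  fun d c =>
    let lo := if c = 0 then 0 else fe + (c - 1) * q
    let hi := if c = 0 then fe else fe + c * q
    let size := fl + c * Δs
    (PySem.List.pyRange lo hi 1).foldl (fun d e => d.insert e size) d

-- one cut-segment worth of constant inserts (c ≥ 1 case of bSeg, the shape A reduces to)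
def segF (Δs q fl fe : Int) : PySem.Dict Int Int → Int → PySem.Dict Int Int :=
  fun d c =>
    (PySem.List.pyRange (fe + (c - 1) * q) (fe + c * q) 1).foldl
      (fun d e => d.insert e (fl + c * Δs)) d

-- a run of A's loop entirely below the threshold t only inserts, state unchanged
lemma flatA (Δs Δq s t b : Int) (hb : b ≤ t) :
    ∀ (n : Nat) (a : Int) (d : PySem.Dict Int Int), (b - a).toNat = n →
      (PySem.List.pyRange a b 1).foldl (aStep Δs Δq) (s, t, d)
        = (s, t, (PySem.List.pyRange a b 1).foldl (fun d e => d.insert e s) d) := by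
  intro n
  induction n with
  | zero =>
    intro a d h
    rw [PySem.List.pyRange_one_eq_nil (by omega)]
    rfl
  | succ n ih =>
    intro a d h
    have hab : a < b := by omega
    rw [PySem.List.pyRange_one_cons hab]
    simp only [List.foldl_cons]
    have h1 : aStep Δs Δq (s, t, d) a = (s, t, d.insert a s) := by
      simp [aStep, show a < t by omega]
    rw [h1]
    exact ih (a + 1) (d.insert a s) (by omega)

-- one full block of A's loop with step q ≥ 1: threshold crossed once, then flat
lemma blockA (Δs q s t : Int) (hq : 1 ≤ q) (d : PySem.Dict Int Int) :
    (PySem.List.pyRange t (t + q) 1).foldl (aStep Δs q) (s, t, d)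
      = (s + Δs, t + q,
          (PySem.List.pyRange t (t + q) 1).foldl (fun d e => d.insert e (s + Δs)) d) := by
  rw [PySem.List.pyRange_one_cons (by omega)]
  simp only [List.foldl_cons]
  have h1 : aStep Δs q (s, t, d) t = (s + Δs, t + q, d.insert t (s + Δs)) := by
    simp [aStep]
  rw [h1]
  exact flatA Δs q (s + Δs) (t + q) (t + q) le_rfl _ (t + 1) _ rfl

-- k consecutive blocks of A (cuts c, …, c+k-1) are k constant segments
lemma blocksA (Δs q fl fe : Int) (hq : 1 ≤ q) :
    ∀ (k : Nat) (c : Int), 1 ≤ c → ∀ (d : PySem.Dict Int Int),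
      (PySem.List.pyRange (fe + (c - 1) * q) (fe + (c - 1) * q + k * q) 1).foldl
          (aStep Δs q) (fl + (c - 1) * Δs, fe + (c - 1) * q, d)
        = (fl + (c - 1 + k) * Δs, fe + (c - 1 + k) * q,
            (PySem.List.pyRange c (c + k) 1).foldl (segF Δs q fl fe) d) := by
  intro k
  induction k with
  | zero =>
    intro c hc d
    rw [show fe + (c - 1) * q + (0 : Nat) * q = fe + (c - 1) * q by push_cast; ring]
    rw [PySem.List.pyRange_one_eq_nil le_rfl,
        show c + ((0 : Nat) : Int) = c by push_cast; ring,
        PySem.List.pyRange_one_eq_nil le_rfl]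
    simp only [List.foldl_nil]
    norm_num
  | succ k ih =>
    intro c hc d
    have hsplit : PySem.List.pyRange (fe + (c - 1) * q) (fe + (c - 1) * q + (k + 1 : Nat) * q) 1
        = PySem.List.pyRange (fe + (c - 1) * q) (fe + (c - 1) * q + q) 1
          ++ PySem.List.pyRange (fe + (c - 1) * q + q) (fe + (c - 1) * q + (k + 1 : Nat) * q) 1 := by
      apply PySem.List.pyRange_one_append
      · omega
      · have : (0 : Int) ≤ (k : Int) * q := by positivity
        push_cast
        nlinarith
    rw [hsplit, List.foldl_append, blockA Δs q _ _ hq d]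
    have harg : fe + (c - 1) * q + q = fe + ((c + 1) - 1) * q := by ring
    have harg2 : fe + (c - 1) * q + (k + 1 : Nat) * q = fe + ((c + 1) - 1) * q + k * q := by
      push_cast; ring
    have harg3 : fl + (c - 1) * Δs + Δs = fl + ((c + 1) - 1) * Δs := by ring
    rw [harg, harg2, harg3]
    rw [ih (c + 1) (by omega) _]
    have hcons : PySem.List.pyRange c (c + (k + 1 : Nat)) 1
        = c :: PySem.List.pyRange (c + 1) (c + 1 + (k : Nat)) 1 := by
      rw [PySem.List.pyRange_one_cons (by push_cast; omega)]
      congr 1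
      push_cast; ring
    rw [hcons]
    simp only [List.foldl_cons]
    have hb : segF Δs q fl fe d c
        = (PySem.List.pyRange (fe + (c - 1) * q) (fe + ((c + 1) - 1) * q) 1).foldl
            (fun d e => d.insert e (fl + c * Δs)) d := by
      unfold segF
      rw [show fe + ((c + 1) - 1) * q = fe + c * q by ring]
    rw [hb, show fl + (c + 1 - 1 + (k : Int)) * Δs = fl + (c - 1 + ((k + 1 : Nat) : Int)) * Δs by push_cast; ring,
        show fe + (c + 1 - 1 + (k : Int)) * q = fe + (c - 1 + ((k + 1 : Nat) : Int)) * q by push_cast; ring,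
        show fl + c * Δs = fl + ((c + 1) - 1) * Δs by ring,
        show fe + (c - 1) * q = fe + ((c + 1) - 1 - 1) * q by ring]

-- B's outer loop splits into the first cut (flat fill of [0, fe)) and segF per later cut
lemma bDecomp (Δs q fl fe cuts : Int) (hc : 1 ≤ cuts) :
    (PySem.List.pyRange 0 cuts 1).foldl (bSeg Δs q fl fe) PySem.Dict.empty
      = (PySem.List.pyRange 1 cuts 1).foldl (segF Δs q fl fe)
          ((PySem.List.pyRange 0 fe 1).foldl (fun d e => d.insert e fl) PySem.Dict.empty) := by
  rw [PySem.List.pyRange_one_cons (by omega)]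
  simp only [List.foldl_cons]
  have h0 : bSeg Δs q fl fe PySem.Dict.empty 0
      = (PySem.List.pyRange 0 fe 1).foldl (fun d e => d.insert e fl) PySem.Dict.empty := by
    simp [bSeg]
  rw [h0]
  apply PySem.List.foldl_congr_mem
  intro acc c hcmem
  have hc1 : 1 ≤ c := (PySem.List.mem_pyRange_one.mp hcmem).1
  simp only [bSeg, segF, if_neg (show ¬ c = 0 by omega)]

-- the central equality, with the floor-division facts supplied as hypotheses
lemma main_eq (sl q fl fe n cuts r : Int)
    (hc : 1 ≤ cuts) (hq0 : 0 ≤ q) (hr0 : 0 ≤ r) (_hr : r < cuts)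
    (hn : n = q * cuts + r) (hfe : fe = q + r) :
    ((PySem.List.pyRange 0 n 1).foldl (aStep sl q) (fl, fe, PySem.Dict.empty)).2.2
      = if q = 0 then
          (PySem.List.pyRange 0 fe 1).foldl (fun d e => d.insert e fl) PySem.Dict.empty
        else
          (PySem.List.pyRange 0 cuts 1).foldl (bSeg sl q fl fe) PySem.Dict.empty := by
  have hfe0 : 0 ≤ fe := by omega
  split_ifs with hqz
  · -- q = 0 : the threshold is never crossed; the whole run is the flat first segment
    subst hqz
    rw [show n = fe by omega,
        flatA sl 0 fl fe fe le_rfl (fe - 0).toNat 0 PySem.Dict.empty rfl]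
  · -- q ≥ 1 : first segment [0, fe), then cuts-1 blocks of length q on both sides
    have hq : 1 ≤ q := by omega
    rw [bDecomp sl q fl fe cuts hc]
    have hk : ((cuts - 1).toNat : Int) = cuts - 1 := by omega
    rw [show n = fe + ((cuts - 1).toNat : Int) * q by rw [hk, hfe, hn]; ring]
    have hsplit : PySem.List.pyRange 0 (fe + ((cuts - 1).toNat : Int) * q) 1
        = PySem.List.pyRange 0 fe 1 ++ PySem.List.pyRange fe (fe + ((cuts - 1).toNat : Int) * q) 1 := by
      apply PySem.List.pyRange_one_append 0 fe _ hfe0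
      have : (0 : Int) ≤ ((cuts - 1).toNat : Int) * q := by positivity
      omega
    rw [hsplit, List.foldl_append,
        flatA sl q fl fe fe le_rfl (fe - 0).toNat 0 PySem.Dict.empty rfl]
    have hA := blocksA sl q fl fe hq (cuts - 1).toNat 1 le_rfl
      ((PySem.List.pyRange 0 fe 1).foldl (fun d e => d.insert e fl) PySem.Dict.empty)
    rw [show fe + ((1 : Int) - 1) * q = fe by ring] at hA
    rw [show fl + ((1 : Int) - 1) * sl = fl by ring] at hA
    rw [hA]
    rw [show (1 : Int) + ((cuts - 1).toNat : Int) = cuts by omega]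

theorem get_latent_steps_spec : Claim_equal_get_latent_steps := by
  intro n ls cuts _ hpre
  obtain ⟨_, hor⟩ := hpre
  unfold Spec_get_latent_steps
  have ha : get_latent_steps n ls cuts
      = ((PySem.List.pyRange 0 n 1).foldl
          (aStep (PySem.Int.floordiv ls cuts) (PySem.Int.floordiv n cuts))
          (PySem.Int.floordiv ls cuts + PySem.Int.mod ls cuts,
           PySem.Int.floordiv n cuts + PySem.Int.mod n cuts, PySem.Dict.empty)).2.2.items := rfl
  have hb : get_latent_steps_alt n ls cuts
      = (if PySem.Int.floordiv n cuts = 0 then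
          ((PySem.List.pyRange 0 (PySem.Int.floordiv n cuts + PySem.Int.mod n cuts) 1).foldl
            (fun (d : PySem.Dict Int Int) e =>
              d.insert e (PySem.Int.floordiv ls cuts + PySem.Int.mod ls cuts)) PySem.Dict.empty).items
         else
          ((PySem.List.pyRange 0 cuts 1).foldl
            (bSeg (PySem.Int.floordiv ls cuts) (PySem.Int.floordiv n cuts)
                  (PySem.Int.floordiv ls cuts + PySem.Int.mod ls cuts)
                  (PySem.Int.floordiv n cuts + PySem.Int.mod n cuts))
            PySem.Dict.empty).items) := rfl
  rw [ha, hb, ← apply_ite PySem.Dict.items]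
  rcases hor with ⟨hc, hn0⟩ | ⟨hc, hn0⟩
  case inl =>
    congr 1
    have hcpos : (0 : Int) < cuts := by omega
    have hq : PySem.Int.floordiv n cuts = n / cuts := PySem.Int.floordiv_eq_ediv_of_pos hcpos
    have hrm : PySem.Int.mod n cuts = n % cuts := PySem.Int.mod_eq_emod_of_pos hcpos
    apply main_eq (r := PySem.Int.mod n cuts)
    · exact hc
    · rw [hq]; exact Int.ediv_nonneg (by omega) (le_of_lt hcpos)
    · rw [hrm]; exact Int.emod_nonneg n (by omega)
    · rw [hrm]; exact Int.emod_lt_of_pos n hcpos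
    · have h := Int.ediv_add_emod n cuts; rw [hq, hrm]; linarith
    · rfl
  case inr =>
    -- nb_epochs ≤ 0 and nb_cuts_latent ≤ -1: both sides are the empty dict
    have hid := PySem.Int.floordiv_mul_add_mod n cuts
    rw [PySem.List.pyRange_one_eq_nil hn0]
    by_cases hqz : PySem.Int.floordiv n cuts = 0
    · have hm : PySem.Int.floordiv n cuts + PySem.Int.mod n cuts = n := by
        rw [hqz] at hid ⊢; omega
      rw [if_pos hqz, hm, PySem.List.pyRange_one_eq_nil hn0]
      rfl
    · rw [if_neg hqz, PySem.List.pyRange_one_eq_nil (by omega : cuts ≤ 0)]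
      rfl
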